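-- pv_equiv track=rewrite | github.com/KJHJason/Programming-Challenges | Python/codewars/6Kyu/wholikesit.py | oldLikes
-- ===== SOURCE A (Python) =====
-- def oldLikes(names):
--     s = ""
--     numOfNames = len(names)
--     if numOfNames == 0:
--         return "no one likes this"
--     elif numOfNames <= 3:
--         s += names[0]
--         if numOfNames > 1:
--             for i, name in enumerate(names[1:], 2):
--                 if i == numOfNames:
--                     s += f" and {name}"
--                 else:
--                     s += f", {name}"
--         return "".join([s, " likes this"]) if numOfNames == 1 else "".join([s, " like this"])
--     else:
--         return f"{names[0]}, {names[1]} and {numOfNames-2} others like this"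
-- ===== SOURCE B (Python) =====
-- def oldLikes(names):
--     n = len(names)
--     if n == 0:
--         return "no one likes this"
--     if n == 1:
--         return f"{names[0]} likes this"
--     if n == 2:
--         return f"{names[0]} and {names[1]} like this"
--     if n == 3:
--         return f"{names[0]}, {names[1]} and {names[2]} like this"
--     return f"{names[0]}, {names[1]} and {n-2} others like this"
-- ===== Notes on version B (the rewrite author's own statement) =====
-- stated objective: simpler
-- what changed: Replaces A's incremental string-building loop (accumulator plus enumerate over names[1:] with an i==n test) by a flat case dispatch on len(names) with one complete f-string per case.
import Mathlib
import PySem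

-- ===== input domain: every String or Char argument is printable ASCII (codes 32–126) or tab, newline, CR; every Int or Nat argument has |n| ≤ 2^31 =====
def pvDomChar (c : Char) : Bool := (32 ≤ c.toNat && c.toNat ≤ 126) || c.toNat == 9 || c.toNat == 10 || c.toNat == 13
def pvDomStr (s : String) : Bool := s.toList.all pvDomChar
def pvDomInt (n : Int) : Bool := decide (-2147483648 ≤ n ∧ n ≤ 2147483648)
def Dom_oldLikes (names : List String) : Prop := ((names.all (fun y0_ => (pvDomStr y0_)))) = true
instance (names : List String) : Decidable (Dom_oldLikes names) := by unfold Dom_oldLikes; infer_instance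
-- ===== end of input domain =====

-- B replaces A's accumulator loop by a direct case dispatch on the length, one complete string per case (simpler).

-- ===== PORT A =====
-- the for-loop over enumerate(names[1:], 2), carrying the accumulator s
def oldLikesLoop (numOfNames : Int) (s : String) : List (Int × String) → String
  | [] => s
  | (i, name) :: rest =>
      oldLikesLoop numOfNames
        (if i == numOfNames then s ++ " and " ++ name else s ++ ", " ++ name) rest

def oldLikes (names : List String) : String :=
  let s := ""
  let numOfNames : Int := names.length
  if numOfNames == 0 then "no one likes this"
  else if numOfNames ≤ 3 then
    -- names[0] is in range here (numOfNames ≥ 1)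
    let s := s ++ PySem.List.pyGetD names 0 ""
    let s := if numOfNames > 1 then
        oldLikesLoop numOfNames s (PySem.List.enumerate (PySem.List.slice names (some 1) none) 2)
      else s
    if numOfNames == 1 then s ++ " likes this" else s ++ " like this"
  else
    PySem.List.pyGetD names 0 "" ++ ", " ++ PySem.List.pyGetD names 1 "" ++ " and " ++
      PySem.Int.toStr (numOfNames - 2) ++ " others like this"

-- ===== PORT B =====
def oldLikes_alt (names : List String) : String :=
  match names with
  | [] => "no one likes this"
  | [a] => a ++ " likes this"
  | [a, b] => a ++ " and " ++ b ++ " like this"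
  | [a, b, c] => a ++ ", " ++ b ++ " and " ++ c ++ " like this"
  | a :: b :: _ =>
      a ++ ", " ++ b ++ " and " ++ PySem.Int.toStr ((names.length : Int) - 2) ++ " others like this"

-- ===== PRECONDITION & SPEC =====
def Spec_oldLikes (names : List String) (out : String) : Prop := out = oldLikes_alt names
instance (names : List String) (out : String) : Decidable (Spec_oldLikes names out) := by unfold Spec_oldLikes; infer_instance

-- ===== CLAIM (what is proved, stated in full; the proofs are below) =====
def Claim_equal_oldLikes : Prop := ∀ (names : List String), Dom_oldLikes names → Spec_oldLikes names (oldLikes names)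

-- ===== LEMMAS AND PROOFS =====

-- ===== VERDICT (by name: the statement is the Claim_ definition above) =====
theorem oldLikes_spec : Claim_equal_oldLikes := by
  intro names _
  unfold Spec_oldLikes oldLikes oldLikes_alt
  match names with
  | [] => rfl
  | [a] =>
      simp [PySem.List.pyGetD]
  | [a, b] =>
      simp [oldLikesLoop, PySem.List.pyGetD, PySem.List.slice, PySem.List.enumerate,
        String.append_assoc]
  | [a, b, c] =>
      simp [oldLikesLoop, PySem.List.pyGetD, PySem.List.slice, PySem.List.enumerate,
        String.append_assoc]
  | a :: b :: c :: d :: t =>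
      have e0 : (0:Int) ≤ (t.length:Int) + 1 + 1 + 1 := by omega
      have e1 : (0:Int) ≤ (t.length:Int) + 1 + 1 := by omega
      rw [if_neg (by simp only [List.length_cons, beq_iff_eq]; push_cast; omega),
          if_neg (by simp only [List.length_cons]; push_cast; omega)]
      simp [PySem.List.pyGetD, PySem.List.pyGet?, PySem.List.pyIdx?, String.append_assoc, e0, e1]
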